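-- pv_equiv track=rewrite | github.com/victor0198utm/CS_lab1 | Lab 1.0 - terminal/audit_to_json.py | check_valid_prop
-- ===== SOURCE A (Python) =====
-- def check_valid_prop(content, idx):
-- 	found_space, found_new_line = False, False
-- 	while idx > 0:
-- 		if not found_new_line and content[idx] == ' ':
-- 			found_space = True
-- 		elif found_space and content[idx] == '\n':
-- 			found_new_line = True
-- 			break
-- 		else:
-- 			return False
--
-- 		idx = idx - 1
-- 	return (idx == 0 and found_space) or (found_space and found_new_line)
-- ===== SOURCE B (Python) =====
-- def check_valid_prop(content, idx):
--     if idx <= 0: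
--         return False
--     if content[idx] != ' ':
--         return False
--     stripped = content[1:idx + 1].rstrip(' ')
--     return stripped == '' or stripped.endswith('\n')
-- ===== Notes on version B (the rewrite author's own statement) =====
-- stated objective: simpler
-- what changed: Replaced A's backward flag-state while-loop (found_space/found_new_line booleans, decrementing index) with a direct decomposition: check content[idx] is a space, strip trailing spaces off the slice content[1:idx+1], and test the remainder is empty or ends with a newline.
import Mathlib
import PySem

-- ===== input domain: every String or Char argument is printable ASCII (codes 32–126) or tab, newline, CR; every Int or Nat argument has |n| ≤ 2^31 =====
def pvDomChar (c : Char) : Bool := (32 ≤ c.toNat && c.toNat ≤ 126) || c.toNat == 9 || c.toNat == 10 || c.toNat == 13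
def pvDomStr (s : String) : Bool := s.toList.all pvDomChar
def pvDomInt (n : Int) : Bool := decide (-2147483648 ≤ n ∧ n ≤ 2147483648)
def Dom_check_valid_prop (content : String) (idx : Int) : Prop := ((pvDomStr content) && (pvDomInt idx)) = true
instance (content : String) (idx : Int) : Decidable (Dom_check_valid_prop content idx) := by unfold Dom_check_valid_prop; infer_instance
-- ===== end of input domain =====

-- B replaces A's backward flag-state scan with a direct decomposition: check content[idx] is a space,
-- strip the trailing spaces off content[1:idx+1], and test the remainder is empty or ends in '\n' (objective: simpler).

-- ===== PORT A =====
-- A's while-loop, one constructor per iteration; fuel = idx.toNat bounds the countdown 'idx = idx - 1'.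
def check_valid_prop_loopA (cs : List Char) : Nat → Int → Bool → Bool → Bool
  | 0, idx, fs, fnl => ((idx == 0) && fs) || (fs && fnl)
  | fuel + 1, idx, fs, fnl =>
    if idx > 0 then
      match PySem.List.pyGet? cs idx with
      | none => false  -- IndexError in Python; excluded by Pre_
      | some c =>
        if !fnl && c == ' ' then check_valid_prop_loopA cs fuel (idx - 1) true fnl
        else if fs && c == '\n' then ((idx == 0) && fs) || (fs && true)  -- break with found_new_line = True
        else false
    else ((idx == 0) && fs) || (fs && fnl)

def check_valid_prop (content : String) (idx : Int) : Bool :=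
  check_valid_prop_loopA content.toList idx.toNat idx false false

-- ===== PORT B =====
def check_valid_prop_alt (content : String) (idx : Int) : Bool :=
  if idx ≤ 0 then false
  else
    match PySem.List.pyGet? content.toList idx with
    | none => false  -- IndexError in Python; excluded by Pre_
    | some c =>
      if c ≠ ' ' then false
      else
        let sub := PySem.List.slice content.toList (some 1) (some (idx + 1))
        -- sub.rstrip(' '): drop exactly the trailing ' ' characters (hand port, exact: no PySem rstrip-with-chars)
        let stripped := (sub.reverse.dropWhile (· == ' ')).reverse
        stripped.isEmpty || PySem.Chars.endswith stripped ['\n']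

-- ===== PRECONDITION & SPEC =====
-- Pre_ excludes exactly the inputs where Python A raises IndexError: idx > 0 with idx past the end of content.
def Pre_check_valid_prop (content : String) (idx : Int) : Prop :=
  idx ≤ 0 ∨ idx < (content.toList.length : Int)
instance (content : String) (idx : Int) : Decidable (Pre_check_valid_prop content idx) := by
  unfold Pre_check_valid_prop; infer_instance

def pvWitness_check_valid_prop : String × Int := ("a \n ", 3)

def Spec_check_valid_prop (content : String) (idx : Int) (out : Bool) : Prop := out = check_valid_prop_alt content idx
instance (content : String) (idx : Int) (out : Bool) : Decidable (Spec_check_valid_prop content idx out) := by unfold Spec_check_valid_prop; infer_instance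

-- ===== CLAIM (what is proved, stated in full; the proofs are below) =====
def Claim_equal_check_valid_prop : Prop := ∀ (content : String) (idx : Int), Dom_check_valid_prop content idx → Pre_check_valid_prop content idx → Spec_check_valid_prop content idx (check_valid_prop content idx)

-- ===== LEMMAS AND PROOFS =====

-- B's body for positions 1..i of cs, after the first-character check has passed.
def bTail (cs : List Char) (i : Int) : Bool :=
  let sub := cs.tail.take i.toNat
  let stripped := (sub.reverse.dropWhile (· == ' ')).reverse
  stripped.isEmpty || PySem.Chars.endswith stripped ['\n']

lemma bTail_zero (cs : List Char) : bTail cs 0 = true := by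
  simp [bTail]

lemma endswith_singleton_append (pre : List Char) (c d : Char) :
    PySem.Chars.endswith (pre ++ [c]) [d] = (c == d) := by
  by_cases h : c = d
  · simp [h, PySem.Chars.endswith, List.isSuffixOf, List.isPrefixOf]
  · simp [PySem.Chars.endswith, List.isSuffixOf, List.isPrefixOf, h, Ne.symm h]

lemma bTail_step (cs : List Char) (i : Int) (h0 : 0 < i) (hlt : i < (cs.length : Int)) :
    bTail cs i =
      (if cs[i.toNat]'(by omega) == ' ' then bTail cs (i - 1)
       else (cs[i.toNat]'(by omega) == '\n')) := by
  have hi : i.toNat < cs.length := by omega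
  have hi' : i.toNat - 1 < cs.tail.length := by
    simp [List.length_tail]; omega
  have htk : cs.tail.take i.toNat = cs.tail.take (i.toNat - 1) ++ [cs.tail[i.toNat - 1]'hi'] := by
    conv_lhs => rw [show i.toNat = (i.toNat - 1) + 1 by omega]
    rw [List.take_add_one]
    simp [List.getElem?_eq_getElem hi']
  have hget : cs.tail[i.toNat - 1]'hi' = cs[i.toNat]'hi := by
    rcases cs with _ | ⟨a, rest⟩
    · simp at hi
    · simp [List.getElem_cons]
      omega
  have hi1 : (i - 1).toNat = i.toNat - 1 := by omega
  by_cases hc : cs[i.toNat]'hi = ' '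
  · simp only [bTail, htk, hget, hc]
    simp [hi1]
  · have hc' : (cs[i.toNat]'hi == ' ') = false := by simpa using hc
    simp only [bTail, htk, hget, hc']
    simp only [List.reverse_append, List.reverse_cons, List.reverse_nil, List.nil_append,
      List.singleton_append, List.dropWhile_cons, hc']
    simp [endswith_singleton_append]

-- A's loop with found_space already true equals B's slice-and-strip test.
lemma loopA_eq_bTail (cs : List Char) (i : Int) (h0 : 0 ≤ i) (hlt : i < (cs.length : Int)) :
    check_valid_prop_loopA cs i.toNat i true false = bTail cs i := by
  generalize hf : i.toNat = fuel
  induction fuel generalizing i with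
  | zero =>
    have : i = 0 := by omega
    subst this
    simp [check_valid_prop_loopA, bTail_zero]
  | succ n ih =>
    have hpos : 0 < i := by omega
    have hi : i.toNat < cs.length := by omega
    rw [check_valid_prop_loopA]
    have hget : PySem.List.pyGet? cs i = some (cs[i.toNat]'hi) := by
      rw [PySem.List.pyGet?_of_nonneg cs h0]
      exact List.getElem?_eq_getElem hi
    rw [if_pos (by omega), hget, bTail_step cs i hpos hlt]
    by_cases hc : cs[i.toNat]'hi = ' '
    · simp only [hc, Bool.not_false, Bool.true_and]
      rw [if_pos (by decide), if_pos (by decide)]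
      exact ih (i - 1) (by omega) (by omega) (by omega)
    · have hc' : (cs[i.toNat]'hi == ' ') = false := by simpa using hc
      simp only [hc', Bool.not_false, Bool.true_and]
      by_cases hn : cs[i.toNat]'hi = '\n'
      · simp [hn]
      · have hn' : (cs[i.toNat]'hi == '\n') = false := by simpa using hn
        simp [hn']

lemma slice_eq_tail_take (cs : List Char) (i : Int) (h0 : 0 < i) :
    PySem.List.slice cs (some 1) (some (i + 1)) = cs.tail.take i.toNat := by
  rw [PySem.List.slice_toNat cs (a := 1) (b := i + 1) (by omega) (by omega)]
  simp [List.drop_one]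
  omega

-- ===== VERDICT (by name: the statement is the Claim_ definition above) =====
theorem check_valid_prop_spec : Claim_equal_check_valid_prop := by
  intro content idx _ hpre
  unfold Spec_check_valid_prop check_valid_prop check_valid_prop_alt
  by_cases h0 : idx ≤ 0
  · have : idx.toNat = 0 := by omega
    simp [this, check_valid_prop_loopA, h0]
  · have hpos : 0 < idx := by omega
    have hlt : idx < (content.toList.length : Int) := by
      rcases hpre with h | h
      · omega
      · exact h
    rw [if_neg h0]
    have hi : idx.toNat < content.toList.length := by omega
    have hget : PySem.List.pyGet? content.toList idx = some (content.toList[idx.toNat]'hi) := by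
      rw [PySem.List.pyGet?_of_nonneg content.toList (le_of_lt hpos)]
      exact List.getElem?_eq_getElem hi
    rw [hget]
    dsimp only
    by_cases hc : content.toList[idx.toNat]'hi = ' '
    · have hb : bTail content.toList idx =
          ((List.dropWhile (fun x => x == ' ') (content.toList.tail.take idx.toNat).reverse).reverse.isEmpty ||
            PySem.Chars.endswith
              (List.dropWhile (fun x => x == ' ') (content.toList.tail.take idx.toNat).reverse).reverse
              ['\n']) := rfl
      rw [if_neg (by simp [hc]), slice_eq_tail_take content.toList idx hpos, ← hb,
        bTail_step content.toList idx hpos hlt, if_pos (by simp [hc])]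
      conv_lhs => rw [show idx.toNat = (idx.toNat - 1) + 1 by omega]
      rw [check_valid_prop_loopA, if_pos (by omega), hget]
      dsimp only
      rw [if_pos (by simp [hc])]
      rw [show idx.toNat - 1 = (idx - 1).toNat by omega]
      exact loopA_eq_bTail content.toList (idx - 1) (by omega) (by omega)
    · rw [if_pos (by simpa using hc)]
      conv_lhs => rw [show idx.toNat = (idx.toNat - 1) + 1 by omega]
      rw [check_valid_prop_loopA]
      rw [if_pos (by omega), hget]
      have hc2 : (content.toList[idx.toNat]'hi == ' ') = false := by simpa using hc
      simp [hc2]
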